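-- pv_equiv track=rewrite | github.com/Rethy729/BaekJoon | 9046_복호화/9046_복호화.py | count
-- ===== SOURCE A (Python) =====
-- from collections import defaultdict
--
-- def count(lst):
--     answer_lst = []
--     for string in lst:
--         letter_dict = defaultdict(int)
--         for letter in string.replace(' ', ''):
--             letter_dict[letter] += 1
--         max_letter = ''
--         max_occur = -99
--         for key in letter_dict:
--             if letter_dict[key] > max_occur:
--                 max_occur = letter_dict[key]
--                 max_letter = key
--         count = 0
--         for key in letter_dict:
--             if letter_dict[key] == max_occur:
--                 count += 1
--         if count > 1:
--             answer_lst.append('?')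
--         else:
--             answer_lst.append(max_letter)
--     return answer_lst
-- ===== SOURCE B (Python) =====
-- from collections import Counter
--
-- def count(lst):
--     def decode(s):
--         best, best_n, tie = '', None, False
--         for letter, n in Counter(s.replace(' ', '')).items():
--             if best_n is None or n > best_n:
--                 best, best_n, tie = letter, n, False
--             elif n == best_n:
--                 tie = True
--         return '?' if tie else best
--     return [decode(s) for s in lst]
-- ===== Notes on version B (the rewrite author's own statement) =====
-- stated objective: simpler
-- what changed: B replaces A's defaultdict plus two separate scans over the dict (one to find the max count, one to count how many keys attain it) with a Counter and a single pass over its items that tracks the current best letter and a tie flag, emitting the result with a comprehension.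
import Mathlib
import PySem

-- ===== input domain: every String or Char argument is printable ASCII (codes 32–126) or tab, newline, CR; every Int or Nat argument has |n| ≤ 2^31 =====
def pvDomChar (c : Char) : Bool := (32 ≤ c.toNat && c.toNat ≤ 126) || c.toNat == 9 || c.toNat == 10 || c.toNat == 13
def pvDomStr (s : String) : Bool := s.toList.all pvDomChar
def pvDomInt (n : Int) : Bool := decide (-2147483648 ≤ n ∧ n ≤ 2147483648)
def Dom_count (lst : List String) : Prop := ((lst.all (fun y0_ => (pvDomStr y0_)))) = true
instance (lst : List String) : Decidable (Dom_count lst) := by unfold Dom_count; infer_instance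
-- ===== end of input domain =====

-- B: one pass over Counter items with a tie flag instead of A's two scans over a defaultdict (simpler).


-- ===== PORT A =====
-- body of A's outer loop: defaultdict count, scan keys for the max, scan keys counting maxima
def countOneA (s : String) : String :=
  let d := (PySem.Str.replace s " " "").toList.foldl
      (fun d letter => d.modify letter 0 (· + 1)) PySem.Dict.empty
  let m := d.keys.foldl
      (fun (p : String × Int) key => if d.getD key 0 > p.2 then (String.mk [key], d.getD key 0) else p)
      ("", -99)
  let c := d.keys.foldl (fun (c : Int) key => if d.getD key 0 = m.2 then c + 1 else c) (0 : Int)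
  if c > 1 then "?" else m.1

def count (lst : List String) : List String :=
  lst.foldl (fun acc s => acc ++ [countOneA s]) []

-- ===== PORT B =====
-- body of B's inner loop: update (best, best_n, tie) with one Counter item
def decodeStep (st : String × Option Int × Bool) (p : Char × Int) : String × Option Int × Bool :=
  match st with
  | (best, none, tie) => (String.mk [p.1], some p.2, false)
  | (best, some bn, tie) =>
    if p.2 > bn then (String.mk [p.1], some p.2, false)
    else if p.2 = bn then (best, some bn, true)
    else (best, some bn, tie)

def decode (s : String) : String :=
  let r := (PySem.Dict.counter (PySem.Str.replace s " " "").toList).items.foldl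
      decodeStep ("", none, false)
  if r.2.2 then "?" else r.1

def count_alt (lst : List String) : List String := lst.map decode

-- ===== PRECONDITION & SPEC =====
def Spec_count (lst : List String) (out : List String) : Prop := out = count_alt lst
instance (lst : List String) (out : List String) : Decidable (Spec_count lst out) := by unfold Spec_count; infer_instance

-- ===== CLAIM (what is proved, stated in full; the proofs are below) =====
def Claim_equal_count : Prop := ∀ (lst : List String), Dom_count lst → Spec_count lst (count lst)

-- ===== LEMMAS AND PROOFS =====

-- A's running max never decreases
lemma maxFold_mono (v : Char → Int) (ks : List Char) (ml : String) (mo : Int) :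
    mo ≤ (ks.foldl (fun (p : String × Int) k => if v k > p.2 then (String.mk [k], v k) else p) (ml, mo)).2 := by
  induction ks generalizing ml mo with
  | nil => simp
  | cons k rest ih =>
    simp only [List.foldl_cons]
    by_cases h : v k > mo
    · simp only [if_pos h]
      exact le_of_lt (lt_of_lt_of_le h (ih _ _))
    · simp only [if_neg h]
      exact ih _ _

-- B's single pass from a committed state equals A's max fold plus a tie characterisation
lemma key_lemma (v : Char → Int) (ks : List Char) (ml : String) (mo : Int) (tie : Bool) :
    (ks.map (fun k => (k, v k))).foldl decodeStep (ml, some mo, tie) =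
      ((ks.foldl (fun (p : String × Int) k => if v k > p.2 then (String.mk [k], v k) else p) (ml, mo)).1,
       some (ks.foldl (fun (p : String × Int) k => if v k > p.2 then (String.mk [k], v k) else p) (ml, mo)).2,
       if mo < (ks.foldl (fun (p : String × Int) k => if v k > p.2 then (String.mk [k], v k) else p) (ml, mo)).2
       then decide (2 ≤ ks.countP (fun k => decide (v k = (ks.foldl (fun (p : String × Int) k => if v k > p.2 then (String.mk [k], v k) else p) (ml, mo)).2)))
       else tie || decide (1 ≤ ks.countP (fun k => decide (v k = mo)))) := by
  induction ks generalizing ml mo tie with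
  | nil => simp
  | cons k rest ih =>
    simp only [List.map_cons, List.foldl_cons, List.countP_cons]
    by_cases h1 : v k > mo
    · have hstep : decodeStep (ml, some mo, tie) (k, v k) = (String.mk [k], some (v k), false) := by
        simp [decodeStep, h1]
      rw [hstep, ih]
      simp only [if_pos h1]
      have hmono := maxFold_mono v rest (String.mk [k]) (v k)
      set a := rest.foldl (fun (p : String × Int) k => if v k > p.2 then (String.mk [k], v k) else p) (String.mk [k], v k) with ha
      have hlt : mo < a.2 := lt_of_lt_of_le h1 hmono
      by_cases h2 : v k < a.2
      · have hne : ¬ (v k = a.2) := ne_of_lt h2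
        simp [h2, hlt, hne]
      · have heq : v k = a.2 := le_antisymm hmono (not_lt.mp h2)
        have hone : (if decide (v k = a.2) = true then 1 else 0) = 1 := by simp [heq]
        simp only [if_pos hlt, if_neg h2, Bool.false_or, hone]
        refine Prod.ext rfl (Prod.ext rfl ?_)
        rw [heq]
        exact decide_eq_decide.mpr (by omega)
    · by_cases h2 : v k = mo
      · have hstep : decodeStep (ml, some mo, tie) (k, v k) = (ml, some mo, true) := by
          simp [decodeStep, h1, h2]
        rw [hstep, ih]
        simp only [if_neg h1]
        have hmono := maxFold_mono v rest ml mo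
        set a := rest.foldl (fun (p : String × Int) k => if v k > p.2 then (String.mk [k], v k) else p) (ml, mo) with ha
        by_cases h3 : mo < a.2
        · have hne : ¬ (v k = a.2) := by rw [h2]; exact ne_of_lt h3
          simp [h3, hne]
        · have hcnt : 1 ≤ rest.countP (fun x => decide (v x = mo)) + 1 := by omega
          simp [h3, h2, hcnt]
      · have hstep : decodeStep (ml, some mo, tie) (k, v k) = (ml, some mo, tie) := by
          simp [decodeStep, h1, h2]
        rw [hstep, ih]
        simp only [if_neg h1]
        have hmono := maxFold_mono v rest ml mo
        set a := rest.foldl (fun (p : String × Int) k => if v k > p.2 then (String.mk [k], v k) else p) (ml, mo) with ha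
        have hltk : v k < mo := lt_of_le_of_ne (not_lt.mp h1) h2
        have hne2 : ¬ (v k = a.2) := ne_of_lt (lt_of_lt_of_le hltk hmono)
        simp [h2, hne2]

-- per string, A's value equals B's value
set_option maxHeartbeats 1000000 in
lemma per_string (s : String) : countOneA s = decode s := by
  unfold countOneA decode
  simp only [← PySem.Dict.counter_eq_foldl, PySem.Dict.keys_counter, PySem.Dict.getD_counter,
    PySem.Dict.items_counter]
  set chars := (PySem.Str.replace s " " "").toList with hchars
  cases hk : PySem.Set.ofList chars with
  | nil => simp [hk]
  | cons k rest =>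
    have hmemset : k ∈ PySem.Set.ofList chars := by rw [hk]; exact List.mem_cons_self ..
    have hmem : k ∈ chars := (PySem.Set.mem_ofList _ _).mp hmemset
    have hpos : (1 : Int) ≤ (chars.count k : Int) := by
      exact_mod_cast List.one_le_count_iff.mpr hmem
    have hgt : ((chars.count k : Int)) > -99 := by omega
    simp only [hk, List.foldl_cons, List.map_cons]
    simp only [if_pos hgt]
    have hstep : decodeStep ("", none, false) (k, (chars.count k : Int)) =
        (String.mk [k], some ((chars.count k : Int)), false) := by simp [decodeStep]
    rw [hstep, key_lemma (fun k => ((chars.count k : Int))) rest (String.mk [k]) ((chars.count k : Int)) false]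
    have hmono := maxFold_mono (fun k => ((chars.count k : Int))) rest (String.mk [k]) ((chars.count k : Int))
    set a := rest.foldl (fun (p : String × Int) k => if ((chars.count k : Int)) > p.2 then (String.mk [k], (chars.count k : Int)) else p) (String.mk [k], (chars.count k : Int)) with ha
    simp only [PySem.List.foldl_ite_add_one, Bool.false_or]
    by_cases h2 : ((chars.count k : Int)) < a.2
    · have hne : ¬ (((chars.count k : Int)) = a.2) := ne_of_lt h2
      simp only [if_pos h2, if_neg hne]
      by_cases hc : 2 ≤ rest.countP (fun x => decide (((chars.count x : Int)) = a.2))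
      · rw [if_pos (show (0 : Int) + (rest.countP (fun x => decide (((chars.count x : Int)) = a.2)) : Int) > 1 by omega),
            if_pos (decide_eq_true hc)]
      · rw [if_neg (show ¬ ((0 : Int) + (rest.countP (fun x => decide (((chars.count x : Int)) = a.2)) : Int) > 1) by omega),
            if_neg (by simp [hc])]
    · have heq : ((chars.count k : Int)) = a.2 := le_antisymm hmono (not_lt.mp h2)
      simp only [heq, lt_self_iff_false, if_false, Bool.false_or, eq_self_iff_true, if_true]
      by_cases hc : 1 ≤ rest.countP (fun x => decide (((chars.count x : Int)) = a.2))
      · rw [if_pos (show ((0 : Int) + 1) + (rest.countP (fun x => decide (((chars.count x : Int)) = a.2)) : Int) > 1 by omega),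
            if_pos (decide_eq_true hc)]
      · rw [if_neg (show ¬ (((0 : Int) + 1) + (rest.countP (fun x => decide (((chars.count x : Int)) = a.2)) : Int) > 1) by omega),
            if_neg (by simp [hc])]

-- ===== VERDICT (by name: the statement is the Claim_ definition above) =====
theorem count_spec : Claim_equal_count := by
  intro lst _
  unfold Spec_count count count_alt
  rw [PySem.List.foldl_append_singleton_eq_map]
  simp only [List.nil_append]
  exact List.map_congr_left (fun s _ => per_string s)
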